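-- pv_equiv track=rewrite | github.com/SUDA-LA/GEC-Syntax-Data-Augmentation | scripts/syntax_pattern/syntax_gec_error_generate.py | search_suffix_pattern
-- ===== SOURCE A (Python) =====
-- def search_suffix_pattern(seq_dep, id, patterns=[]):
--     suf_lst = []
--     for pattern in patterns:
--         length = len(pattern)
--         if id+length <= len(seq_dep):
--             value = tuple([i[3] for i in seq_dep[id+1:id+length+1]])
--             if value == pattern and len(suf_lst) < len(value):
--                 suf_lst = [idx for idx in range(id+1, id+length+1)]
--     return suf_lst
-- ===== SOURCE B (Python) =====
-- def search_suffix_pattern(seq_dep, id, patterns=[]):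
--     # Sort patterns by length descending and return on the first (hence longest)
--     # match; the output only depends on the length of the longest matching pattern.
--     tags = [row[3] for row in seq_dep]
--     for pattern in sorted(patterns, key=len, reverse=True):
--         k = len(pattern)
--         if k and id + k <= len(seq_dep) and tags[id+1:id+k+1] == list(pattern):
--             return list(range(id+1, id+k+1))
--     return []
-- ===== Notes on version B (the rewrite author's own statement) =====
-- stated objective: alternative
-- what changed: B precomputes the dependency-tag column once, sorts the patterns by length descending and returns the index range for the first (hence longest) pattern whose tag slice matches, instead of A's full scan that rebuilds a tag tuple for every pattern and keeps the longest match in an accumulator.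
import Mathlib
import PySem

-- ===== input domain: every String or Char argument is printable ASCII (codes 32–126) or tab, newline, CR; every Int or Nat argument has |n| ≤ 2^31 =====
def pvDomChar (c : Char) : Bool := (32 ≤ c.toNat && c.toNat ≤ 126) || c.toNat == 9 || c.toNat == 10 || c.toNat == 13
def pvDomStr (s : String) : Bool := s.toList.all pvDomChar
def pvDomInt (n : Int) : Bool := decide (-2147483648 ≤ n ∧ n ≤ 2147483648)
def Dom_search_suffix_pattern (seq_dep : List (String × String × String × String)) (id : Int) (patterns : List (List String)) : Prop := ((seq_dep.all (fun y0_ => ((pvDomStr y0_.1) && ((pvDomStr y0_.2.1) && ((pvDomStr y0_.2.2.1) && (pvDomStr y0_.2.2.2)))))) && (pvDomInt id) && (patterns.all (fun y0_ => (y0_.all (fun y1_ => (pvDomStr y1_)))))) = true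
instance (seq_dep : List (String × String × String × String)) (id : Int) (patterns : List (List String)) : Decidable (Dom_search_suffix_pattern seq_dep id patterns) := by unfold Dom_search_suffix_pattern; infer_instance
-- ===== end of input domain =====

-- B precomputes the tag column once, sorts the patterns by length descending and
-- returns on the first (hence longest) match, instead of A's full scan keeping the max.

-- ===== PORT A =====
def search_suffix_pattern (seq_dep : List (String × String × String × String)) (id : Int) (patterns : List (List String)) : List Int :=
  patterns.foldl (fun suf_lst pattern =>
    let length : Int := pattern.length
    if id + length ≤ (seq_dep.length : Int) then
      let value : List String := (PySem.List.slice seq_dep (some (id+1)) (some (id+length+1))).map (fun i => i.2.2.2)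
      if value = pattern ∧ suf_lst.length < value.length then
        PySem.List.pyRange (id+1) (id+length+1) 1
      else suf_lst
    else suf_lst) []

-- ===== PORT B =====
def altLoop (seq_len : Int) (id : Int) (tags : List String) : List (List String) → List Int
  | [] => []
  | pattern :: rest =>
    let k : Int := pattern.length
    if k ≠ 0 ∧ id + k ≤ seq_len ∧ PySem.List.slice tags (some (id+1)) (some (id+k+1)) = pattern then
      PySem.List.pyRange (id+1) (id+k+1) 1
    else altLoop seq_len id tags rest

def search_suffix_pattern_alt (seq_dep : List (String × String × String × String)) (id : Int) (patterns : List (List String)) : List Int :=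
  let tags := seq_dep.map (fun row => row.2.2.2)
  altLoop (seq_dep.length : Int) id tags
    (PySem.List.sorted patterns (fun p => p.length) true)

-- ===== PRECONDITION & SPEC =====
def Spec_search_suffix_pattern (seq_dep : List (String × String × String × String)) (id : Int) (patterns : List (List String)) (out : List Int) : Prop := out = search_suffix_pattern_alt seq_dep id patterns
instance (seq_dep : List (String × String × String × String)) (id : Int) (patterns : List (List String)) (out : List Int) : Decidable (Spec_search_suffix_pattern seq_dep id patterns out) := by unfold Spec_search_suffix_pattern; infer_instance

-- ===== CLAIM =====
def Claim_equal_search_suffix_pattern : Prop := ∀ (seq_dep : List (String × String × String × String)) (id : Int) (patterns : List (List String)), Dom_search_suffix_pattern seq_dep id patterns → Spec_search_suffix_pattern seq_dep id patterns (search_suffix_pattern seq_dep id patterns)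

-- ===== LEMMAS AND PROOFS =====

-- slice commutes with map
theorem slice_map {α β : Type} (f : α → β) (xs : List α) (a b : Int) :
    (PySem.List.slice xs (some a) (some b)).map f = PySem.List.slice (xs.map f) (some a) (some b) := by
  simp [PySem.List.slice, List.map_drop, List.map_take]

-- the matching condition both programs test for one pattern, and the length it contributes
def gLen (n id : Int) (tags : List String) (p : List String) : Nat :=
  if id + (p.length : Int) ≤ n ∧ PySem.List.slice tags (some (id+1)) (some (id+(p.length : Int)+1)) = p
  then p.length else 0

-- length of the longest matching pattern in l
def mLen (n id : Int) (tags : List String) (l : List (List String)) : Nat :=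
  (l.map (gLen n id tags)).foldr max 0

theorem gLen_le (n id : Int) (tags : List String) (p : List String) : gLen n id tags p ≤ p.length := by
  unfold gLen; split_ifs <;> omega

theorem mLen_le (n id : Int) (tags : List String) (l : List (List String)) (m : Nat)
    (h : ∀ q ∈ l, q.length ≤ m) : mLen n id tags l ≤ m := by
  induction l with
  | nil => simp [mLen]
  | cons q rest ih =>
    have h1 := (gLen_le n id tags q).trans (h q (List.mem_cons_self ..))
    have h2 := ih (fun r hr => h r (List.mem_cons_of_mem _ hr))
    simp only [mLen, List.map_cons, List.foldr_cons] at *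
    omega

theorem mLen_perm (n id : Int) (tags : List String) (l l' : List (List String)) (h : l.Perm l') :
    mLen n id tags l = mLen n id tags l' := by
  unfold mLen
  exact @List.Perm.foldr_eq _ _ max _ _ ⟨fun a b c => Nat.max_left_comm a b c⟩ (h.map (gLen n id tags)) 0

-- A's loop: starting from the range for best length m, the fold ends at the range for max m (mLen l)
theorem foldA_eq (seq_dep : List (String × String × String × String)) (id : Int)
    (l : List (List String)) (m : Nat) :
    l.foldl (fun suf_lst pattern =>
      let length : Int := pattern.length
      if id + length ≤ (seq_dep.length : Int) then
        let value : List String := (PySem.List.slice seq_dep (some (id+1)) (some (id+length+1))).map (fun i => i.2.2.2)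
        if value = pattern ∧ suf_lst.length < value.length then
          PySem.List.pyRange (id+1) (id+length+1) 1
        else suf_lst
      else suf_lst) (PySem.List.pyRange (id+1) (id+(m : Int)+1) 1)
    = PySem.List.pyRange (id+1) (id+(max m (mLen (seq_dep.length : Int) id (seq_dep.map (fun row => row.2.2.2)) l) : Int)+1) 1 := by
  induction l generalizing m with
  | nil => simp [mLen]
  | cons p rest ih =>
    simp only [List.foldl_cons]
    have hlen : (PySem.List.pyRange (id+1) (id+(m : Int)+1) 1).length = m := by
      rw [PySem.List.length_pyRange_one]; omega
    have hmc : mLen (seq_dep.length : Int) id (seq_dep.map (fun row => row.2.2.2)) (p :: rest)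
        = max (gLen (seq_dep.length : Int) id (seq_dep.map (fun row => row.2.2.2)) p)
              (mLen (seq_dep.length : Int) id (seq_dep.map (fun row => row.2.2.2)) rest) := by
      simp [mLen]
    by_cases hg : id + (p.length : Int) ≤ (seq_dep.length : Int)
    · by_cases hv : (PySem.List.slice seq_dep (some (id+1)) (some (id+(p.length : Int)+1))).map (fun i => i.2.2.2) = p
      · have hslice : PySem.List.slice (seq_dep.map (fun row => row.2.2.2)) (some (id+1)) (some (id+(p.length : Int)+1)) = p := by
          rw [← slice_map]; exact hv
        have hgl : gLen (seq_dep.length : Int) id (seq_dep.map (fun row => row.2.2.2)) p = p.length := by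
          unfold gLen; rw [if_pos ⟨hg, hslice⟩]
        by_cases hm : m < p.length
        · rw [if_pos hg, if_pos ⟨hv, by rw [hlen, hv]; exact hm⟩]
          have : PySem.List.pyRange (id+1) (id+(p.length : Int)+1) 1
              = PySem.List.pyRange (id+1) (id+((p.length : Nat) : Int)+1) 1 := rfl
          rw [this, ih p.length, hmc, hgl]
          congr 2 <;> omega
        · rw [if_pos hg, if_neg (by rintro ⟨h1, h2⟩; rw [hlen, h1] at h2; exact hm h2)]
          rw [ih m, hmc, hgl]
          congr 2 <;> omega
      · have hgl : gLen (seq_dep.length : Int) id (seq_dep.map (fun row => row.2.2.2)) p = 0 := by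
          unfold gLen
          rw [if_neg (by rintro ⟨_, h2⟩; exact hv (by rw [slice_map]; exact h2))]
        rw [if_pos hg, if_neg (by rintro ⟨h1, _⟩; exact hv h1)]
        rw [ih m, hmc, hgl]
        congr 2 <;> omega
    · have hgl : gLen (seq_dep.length : Int) id (seq_dep.map (fun row => row.2.2.2)) p = 0 := by
        unfold gLen; rw [if_neg (by rintro ⟨h1, _⟩; exact hg h1)]
      rw [if_neg hg, ih m, hmc, hgl]
      congr 2 <;> omega

-- B's loop on a length-descending list returns the range for the longest match
theorem altLoop_eq (n id : Int) (tags : List String) (l : List (List String))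
    (hp : l.Pairwise (fun a b => b.length ≤ a.length)) :
    altLoop n id tags l = PySem.List.pyRange (id+1) (id+(mLen n id tags l : Int)+1) 1 := by
  induction l with
  | nil =>
    simp only [altLoop, mLen, List.map_nil, List.foldr_nil]
    rw [PySem.List.pyRange_one_eq_nil (by omega)]
  | cons p rest ih =>
    rcases List.pairwise_cons.mp hp with ⟨hall, hrest⟩
    have hmc : mLen n id tags (p :: rest) = max (gLen n id tags p) (mLen n id tags rest) := by
      simp [mLen]
    simp only [altLoop]
    by_cases hc : (p.length : Int) ≠ 0 ∧ id + (p.length : Int) ≤ n ∧ PySem.List.slice tags (some (id+1)) (some (id+(p.length : Int)+1)) = p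
    · rw [if_pos hc]
      have hgl : gLen n id tags p = p.length := by
        unfold gLen; rw [if_pos ⟨hc.2.1, hc.2.2⟩]
      have hle : mLen n id tags rest ≤ p.length := mLen_le n id tags rest p.length hall
      rw [hmc, hgl]
      congr 2 <;> omega
    · rw [if_neg hc, ih hrest, hmc]
      by_cases h0 : p.length = 0
      · have hgl : gLen n id tags p ≤ 0 := h0 ▸ gLen_le n id tags p
        congr 2 <;> omega
      · have hgl : gLen n id tags p = 0 := by
          unfold gLen
          rw [if_neg (by rintro ⟨h1, h2⟩; exact hc ⟨by exact_mod_cast h0, h1, h2⟩)]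
        rw [hgl]
        congr 2 <;> omega

-- ===== VERDICT =====
theorem search_suffix_pattern_spec : Claim_equal_search_suffix_pattern := by
  intro seq_dep id patterns _
  show search_suffix_pattern seq_dep id patterns = search_suffix_pattern_alt seq_dep id patterns
  unfold search_suffix_pattern search_suffix_pattern_alt
  have hnil : ([] : List Int) = PySem.List.pyRange (id+1) (id+((0 : Nat) : Int)+1) 1 := by
    rw [PySem.List.pyRange_one_eq_nil (by omega)]
  rw [hnil, foldA_eq seq_dep id patterns 0,
      altLoop_eq _ _ _ _ (by
        have := PySem.List.sorted_pairwise_rev patterns (fun p => p.length)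
        exact this),
      mLen_perm _ _ _ _ _ (PySem.List.sorted_perm patterns (fun p => p.length) true)]
  simp
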